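-- pv_equiv track=rewrite | github.com/dev9454/EVENT-EXTRACTION | GPO_Data_Mining_Analysis-BCO-9371_BCO-13433_BCO-13435_common_script_cut-in/src/Lidar_KPI/GT_labeling.py | log_type
-- ===== SOURCE A (Python) =====
-- def log_type(logName):
--     logName = logName.replace('_dma', '_bus')
--     basename = logName.split('.')[0]
--     basename_logname = "_".join([i for i in basename.split('_') if not i.startswith('r')])
--     if len(basename_logname) == len(basename):
--         return 'Original'
--     else:
--         return 'RESIM'
-- ===== SOURCE B (Python) =====
-- def log_type(logName):
--     logName = logName.replace('_dma', '_bus')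
--     basename = logName.split('.')[0]
--     for token in basename.split('_'):
--         if token.startswith('r'):
--             return 'RESIM'
--     return 'Original'
-- ===== Notes on version B (the rewrite author's own statement) =====
-- stated objective: simpler
-- what changed: Instead of joining the tokens that do not start with 'r' back into a string and comparing its length with the basename's, B early-returns 'RESIM' on the first underscore-token starting with 'r'; no filtered string or length comparison is built.
import Mathlib
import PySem

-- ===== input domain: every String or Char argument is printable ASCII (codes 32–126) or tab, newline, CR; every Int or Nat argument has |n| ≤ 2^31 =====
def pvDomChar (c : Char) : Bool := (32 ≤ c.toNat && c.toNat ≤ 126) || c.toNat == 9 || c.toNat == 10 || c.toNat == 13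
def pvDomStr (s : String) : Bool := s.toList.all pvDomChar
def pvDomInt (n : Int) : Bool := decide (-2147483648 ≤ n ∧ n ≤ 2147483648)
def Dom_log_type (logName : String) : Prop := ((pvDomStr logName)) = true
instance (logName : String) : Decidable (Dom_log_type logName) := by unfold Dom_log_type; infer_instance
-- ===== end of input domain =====

-- B replaces A's filter-join-and-compare-lengths logic by an early-returning scan for an
-- underscore-token starting with 'r' (objective: simpler; same return value, no side effects).

-- ===== PORT A =====
-- split('.')[0]: split with a nonempty separator always returns a nonempty list, so headD is exact
def log_type (logName : String) : String :=
  let s := PySem.Str.replace logName "_dma" "_bus"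
  let basename := (PySem.Chars.splitOn s.toList ['.']).headD []
  let basename_logname := PySem.Chars.join ['_']
    ((PySem.Chars.splitOn basename ['_']).filter (fun i => !(PySem.Chars.startswith i ['r'])))
  if PySem.Chars.len basename_logname = PySem.Chars.len basename then "Original" else "RESIM"

-- ===== PORT B =====
-- the for-loop of Source B with its early return
def pvScanTokens : List (List Char) → String
  | [] => "Original"
  | t :: ts => if PySem.Chars.startswith t ['r'] then "RESIM" else pvScanTokens ts

def log_type_alt (logName : String) : String :=
  let s := PySem.Str.replace logName "_dma" "_bus"
  let basename := (PySem.Chars.splitOn s.toList ['.']).headD []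
  pvScanTokens (PySem.Chars.splitOn basename ['_'])

-- ===== PRECONDITION & SPEC =====
def Spec_log_type (logName : String) (out : String) : Prop := out = log_type_alt logName
instance (logName : String) (out : String) : Decidable (Spec_log_type logName out) := by unfold Spec_log_type; infer_instance

-- ===== CLAIM (what is proved, stated in full; the proofs are below) =====
def Claim_equal_log_type : Prop := ∀ (logName : String), Dom_log_type logName → Spec_log_type logName (log_type logName)

-- ===== LEMMAS AND PROOFS =====

-- join with the separator absorbed into a merged last pair
theorem pv_join_append_two (sep a b : List Char) (xs : List (List Char)) :
    PySem.Chars.join sep (xs ++ [a, b]) = PySem.Chars.join sep (xs ++ [a ++ sep ++ b]) := by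
  induction xs with
  | nil => simp [PySem.Chars.join_cons_cons, PySem.Chars.join_singleton]
  | cons x xs ih =>
    have h1 : ∃ y t, xs ++ [a, b] = y :: t := by cases xs <;> exact ⟨_, _, rfl⟩
    have h2 : ∃ y t, xs ++ [a ++ sep ++ b] = y :: t := by cases xs <;> exact ⟨_, _, rfl⟩
    obtain ⟨y1, t1, e1⟩ := h1
    obtain ⟨y2, t2, e2⟩ := h2
    rw [List.cons_append, e1, PySem.Chars.join_cons_cons, ← e1, ih, e2,
        List.cons_append, e2, PySem.Chars.join_cons_cons]

-- joining the pieces produced by splitOn.go reconstructs the remaining input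
theorem pv_go_join (sep : List Char) (hsep : sep ≠ []) :
    ∀ (fuel : Nat) (l cur : List Char) (acc : List (List Char)), l.length < fuel →
    PySem.Chars.join sep (PySem.Chars.splitOn.go sep fuel l cur acc) =
      PySem.Chars.join sep (acc.reverse ++ [cur.reverse ++ l]) := by
  intro fuel
  induction fuel with
  | zero => intro l cur acc h; omega
  | succ fuel ih =>
    intro l cur acc h
    cases l with
    | nil =>
      rw [PySem.Chars.splitOn.go]
      · simp
      · omega
    | cons c rest =>
      rw [PySem.Chars.splitOn.go]
      by_cases hp : sep.isPrefixOf (c :: rest) = true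
      · rw [if_pos hp]
        have hpre : sep <+: (c :: rest) := List.isPrefixOf_iff_prefix.mp hp
        obtain ⟨tl, htl⟩ := hpre
        have hdrop : List.drop sep.length (c :: rest) = tl := by
          rw [← htl, List.drop_left]
        have hlen : tl.length < fuel := by
          have : sep.length + tl.length = (c :: rest).length := by
            rw [← htl]; simp
          have hs : 1 ≤ sep.length := by cases sep with
            | nil => exact absurd rfl hsep
            | cons _ _ => simp
          simp at this h ⊢
          omega
        rw [hdrop, ih tl [] (cur.reverse :: acc) hlen]
        have : (cur.reverse :: acc).reverse ++ [List.reverse [] ++ tl]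
             = acc.reverse ++ [cur.reverse] ++ [tl] := by simp
        rw [this, List.append_assoc]
        have e2 : acc.reverse ++ ([cur.reverse] ++ [tl]) = acc.reverse ++ [cur.reverse, tl] := rfl
        rw [e2, pv_join_append_two]
        rw [← htl]
        simp
      · rw [if_neg hp]
        have hlen : rest.length < fuel := by simp at h; omega
        rw [ih rest (c :: cur) acc hlen]
        simp

theorem pv_join_splitOn (bn : List Char) :
    PySem.Chars.join ['_'] (PySem.Chars.splitOn bn ['_']) = bn := by
  unfold PySem.Chars.splitOn
  rw [pv_go_join ['_'] (by simp) (bn.length + 1) bn [] [] (by omega)]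
  simp [PySem.Chars.join_singleton]

-- length of a '_'-join: sum of token lengths plus the separators
theorem pv_join_len (ts : List (List Char)) :
    (PySem.Chars.join ['_'] ts).length = (ts.map List.length).sum + (ts.length - 1) := by
  induction ts with
  | nil => simp [PySem.Chars.join_nil]
  | cons a ts ih =>
    cases ts with
    | nil => simp [PySem.Chars.join_singleton]
    | cons b ts' =>
      rw [PySem.Chars.join_cons_cons]
      simp at ih ⊢
      omega

theorem pv_countP_split (p : List Char → Bool) (ts : List (List Char)) :
    ts.countP p + ts.countP (fun t => !p t) = ts.length := by
  induction ts with
  | nil => simp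
  | cons t ts ih =>
    by_cases h : p t = true <;> simp [h] <;> omega

theorem pv_filter_sum_count (p : List Char → Bool) (ts : List (List Char))
    (h : ∀ t ∈ ts, p t = false → t ≠ []) :
    ((ts.filter p).map List.length).sum + ts.countP (fun t => !p t) ≤ (ts.map List.length).sum := by
  induction ts with
  | nil => simp
  | cons t ts ih =>
    have ih' := ih (fun u hu => h u (List.mem_cons_of_mem _ hu))
    by_cases hp : p t = true
    · simp [hp]; omega
    · have hne : t ≠ [] := h t (List.mem_cons_self) (by simpa using hp)
      have ht1 : 1 ≤ t.length := by
        cases t with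
        | nil => exact absurd rfl hne
        | cons _ _ => simp
      simp [hp]
      omega

theorem pv_filter_len_pos (p : List Char → Bool) (ts : List (List Char))
    (hne : ∀ t ∈ ts, p t = false → t ≠ []) :
    ((PySem.Chars.join ['_'] (ts.filter p)).length = (PySem.Chars.join ['_'] ts).length)
      ↔ ∀ t ∈ ts, p t = true := by
  constructor
  · intro hlen
    by_contra hex
    push Not at hex
    obtain ⟨t, ht, hpt⟩ := hex
    have hk : 0 < ts.countP (fun t => !p t) := by
      rw [List.countP_pos_iff]
      exact ⟨t, ht, by simp [hpt]⟩
    have h1 := pv_join_len (ts.filter p)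
    have h2 := pv_join_len ts
    have h3 := pv_filter_sum_count p ts hne
    have h4 := pv_countP_split p ts
    have h5 : ts.countP p = (ts.filter p).length := List.countP_eq_length_filter
    -- m = 0 forces the filtered sum to be 0
    by_cases hm : (ts.filter p).length = 0
    · have hfe : ts.filter p = [] := List.length_eq_zero_iff.mp hm
      rw [hfe, PySem.Chars.join_nil] at hlen
      simp at hlen
      omega
    · omega
  · intro hall
    rw [List.filter_eq_self.mpr hall]

-- the scan of Source B returns "Original" exactly when no token starts with 'r'
theorem pv_scan_eq (ts : List (List Char)) :
    pvScanTokens ts =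
      (if ∀ t ∈ ts, (!(PySem.Chars.startswith t ['r'])) = true then "Original" else "RESIM") := by
  induction ts with
  | nil => simp [pvScanTokens]
  | cons t ts ih =>
    by_cases h : PySem.Chars.startswith t ['r'] = true
    · simp [pvScanTokens, h]
    · simp only [pvScanTokens, h, ih]
      simp [h]

-- ===== VERDICT (by name: the statement is the Claim_ definition above) =====
theorem log_type_spec : Claim_equal_log_type := by
  intro logName _
  unfold Spec_log_type log_type log_type_alt
  set basename := (PySem.Chars.splitOn (PySem.Str.replace logName "_dma" "_bus").toList ['.']).headD [] with hb
  set p : List Char → Bool := fun i => !(PySem.Chars.startswith i ['r']) with hp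
  set ts := PySem.Chars.splitOn basename ['_'] with hts
  have hne : ∀ t ∈ ts, p t = false → t ≠ [] := by
    intro t _ hpt
    have : PySem.Chars.startswith t ['r'] = true := by simpa [hp] using hpt
    have hpre : ['r'] <+: t := List.isPrefixOf_iff_prefix.mp this
    intro hn
    rw [hn] at hpre
    simpa using hpre.length_le
  have hj : PySem.Chars.join ['_'] ts = basename := pv_join_splitOn basename
  have hiff := pv_filter_len_pos p ts hne
  rw [hj] at hiff
  rw [pv_scan_eq]
  by_cases hc : ∀ t ∈ ts, p t = true
  · rw [if_pos hc]
    rw [if_pos]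
    simp only [PySem.Chars.len]
    exact_mod_cast hiff.mpr hc
  · rw [if_neg hc]
    rw [if_neg]
    simp only [PySem.Chars.len]
    intro h
    exact hc (hiff.mp (by exact_mod_cast h))
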